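-- pv_equiv track=rewrite | github.com/JJEW22/JJEW22.github.io | static/marchMadness/generateOptimalBrackets.py | get_furthest_round
-- ===== SOURCE A (Python) =====
-- def get_furthest_round(picks_bracket, team_name):
--     """Find the furthest round a team reaches in the participant's bracket."""
--     # Check championship
--     champ = picks_bracket.get("round6", [{}])[0].get("winner", {})
--     if champ and champ.get("name") == team_name:
--         return 6
--
--     for round_num in range(5, 0, -1):
--         round_key = f"round{round_num}"
--         for game in picks_bracket.get(round_key, []):
--             if game and game.get("winner") and game["winner"].get("name") == team_name:
--                 return round_num
--     return 0
-- ===== SOURCE B (Python) =====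
-- def get_furthest_round(picks_bracket, team_name):
--     """Find the furthest round a team reaches in the participant's bracket."""
--     furthest = {}
--     for round_num in range(1, 6):
--         for game in picks_bracket.get(f"round{round_num}", []):
--             if game:
--                 winner = game.get("winner")
--                 if winner:
--                     name = winner.get("name")
--                     if name is not None:
--                         furthest[name] = round_num
--     round6 = picks_bracket.get("round6")
--     if round6:
--         champ = round6[0].get("winner", {})
--         if champ:
--             name = champ.get("name")
--             if name is not None:
--                 furthest[name] = 6
--     return furthest.get(team_name, 0)
-- ===== Notes on version B (the rewrite author's own statement) =====
-- stated objective: alternative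
-- what changed: Replaces the early-return descending scan (championship special-case first, then rounds 5..1) with a single ascending pass that builds a dict from winner name to round number (higher rounds overwrite lower ones, round6 first game last) followed by one lookup.
import Mathlib
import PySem

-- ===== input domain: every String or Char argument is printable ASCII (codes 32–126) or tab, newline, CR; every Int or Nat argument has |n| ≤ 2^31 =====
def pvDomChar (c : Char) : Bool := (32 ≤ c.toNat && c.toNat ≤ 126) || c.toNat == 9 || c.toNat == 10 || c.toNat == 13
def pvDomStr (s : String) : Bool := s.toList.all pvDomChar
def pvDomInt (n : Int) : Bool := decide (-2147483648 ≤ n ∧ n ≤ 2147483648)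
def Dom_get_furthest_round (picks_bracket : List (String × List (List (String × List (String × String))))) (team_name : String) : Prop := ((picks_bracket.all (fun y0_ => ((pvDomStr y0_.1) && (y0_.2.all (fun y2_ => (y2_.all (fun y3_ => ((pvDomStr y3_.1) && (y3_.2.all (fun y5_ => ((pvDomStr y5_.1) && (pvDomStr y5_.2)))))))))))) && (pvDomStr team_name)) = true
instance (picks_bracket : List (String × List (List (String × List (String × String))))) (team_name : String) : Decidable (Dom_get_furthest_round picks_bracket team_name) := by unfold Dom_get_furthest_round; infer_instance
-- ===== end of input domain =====

-- ===== PORT A =====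
-- B replaces A's early-return descending scan with one ascending pass building a name→round dict, then a single lookup (alternative decomposition, same cost).

-- ===== PORT A =====
-- A's inner-loop condition: game and game.get("winner") and game["winner"].get("name") == team_name
def pvAWins (team_name : String) (g : List (String × List (String × String))) : Bool :=
  decide (g ≠ []) &&
    (match (PySem.Dict.mk g).get? "winner" with
     | some w => decide (w ≠ []) && ((PySem.Dict.mk w).get? "name" == some team_name)
     | none => false)

-- inner loop over a round's games: early return of round_num
def pvAGames (team_name : String) (round_num : Int) :
    List (List (String × List (String × String))) → Option Int
  | [] => none
  | g :: rest =>
    if pvAWins team_name g then some round_num else pvAGames team_name round_num rest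

-- outer loop: for round_num in range(5, 0, -1), early return
def pvARounds (picks_bracket : List (String × List (List (String × List (String × String)))))
    (team_name : String) : List Int → Int
  | [] => 0
  | r :: rest =>
    match pvAGames team_name r
        ((PySem.Dict.mk picks_bracket).getD ("round" ++ PySem.Int.toStr r) []) with
    | some v => v
    | none => pvARounds picks_bracket team_name rest

-- champ = picks_bracket.get("round6", [{}])[0].get("winner", {}); the [0] IndexError case (round6 ↦ []) is outside Pre_
def pvChamp (picks_bracket : List (String × List (List (String × List (String × String))))) :
    List (String × String) :=
  match (match (PySem.Dict.mk picks_bracket).get? "round6" with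
         | some l => PySem.List.pyGet? l 0
         | none => some []) with
  | some g0 => (PySem.Dict.mk g0).getD "winner" []
  | none => []

def get_furthest_round (picks_bracket : List (String × List (List (String × List (String × String))))) (team_name : String) : Int :=
  if pvChamp picks_bracket ≠ [] ∧ (PySem.Dict.mk (pvChamp picks_bracket)).get? "name" = some team_name then 6
  else pvARounds picks_bracket team_name (PySem.List.pyRange 5 0 (-1))

-- ===== PORT B =====
-- process one game of round round_num: record the winner's name
def pvBGame (round_num : Int) (d : PySem.Dict String Int)
    (g : List (String × List (String × String))) : PySem.Dict String Int :=
  if g ≠ [] then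
    match (PySem.Dict.mk g).get? "winner" with
    | some w =>
      if w ≠ [] then
        match (PySem.Dict.mk w).get? "name" with
        | some name => d.insert name round_num
        | none => d
      else d
    | none => d
  else d

-- the forward pass over rounds 1..5
def pvBDictAll (picks_bracket : List (String × List (List (String × List (String × String))))) :
    PySem.Dict String Int :=
  (PySem.List.pyRange 1 6 1).foldl
    (fun d r =>
      ((PySem.Dict.mk picks_bracket).getD ("round" ++ PySem.Int.toStr r) []).foldl (pvBGame r) d)
    PySem.Dict.empty

-- the round6 block of Source B (its local variable champ is inlined)
def pvBFinal (picks_bracket : List (String × List (List (String × List (String × String)))))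
    (d : PySem.Dict String Int) : PySem.Dict String Int :=
  match (PySem.Dict.mk picks_bracket).get? "round6" with
  | some l =>
    if l ≠ [] then
      if (PySem.Dict.mk (l.headD [])).getD "winner" [] ≠ [] then
        match (PySem.Dict.mk ((PySem.Dict.mk (l.headD [])).getD "winner" [])).get? "name" with
        | some name => d.insert name 6
        | none => d
      else d
    else d
  | none => d

def get_furthest_round_alt (picks_bracket : List (String × List (List (String × List (String × String))))) (team_name : String) : Int :=
  (pvBFinal picks_bracket (pvBDictAll picks_bracket)).getD team_name 0

-- ===== PRECONDITION & SPEC =====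
-- Pre_ excludes only brackets mapping "round6" to an empty list, where A's `[0]` raises IndexError.
def Pre_get_furthest_round (picks_bracket : List (String × List (List (String × List (String × String))))) (team_name : String) : Prop :=
  (PySem.Dict.mk picks_bracket).get? "round6" ≠ some []

instance (picks_bracket : List (String × List (List (String × List (String × String))))) (team_name : String) : Decidable (Pre_get_furthest_round picks_bracket team_name) := by unfold Pre_get_furthest_round; infer_instance

def pvWitness_get_furthest_round : (List (String × List (List (String × List (String × String))))) × String :=
  ([("round1", [[("winner", [("name", "x")])]])], "x")

def Spec_get_furthest_round (picks_bracket : List (String × List (List (String × List (String × String))))) (team_name : String) (out : Int) : Prop := out = get_furthest_round_alt picks_bracket team_name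
instance (picks_bracket : List (String × List (List (String × List (String × String))))) (team_name : String) (out : Int) : Decidable (Spec_get_furthest_round picks_bracket team_name out) := by unfold Spec_get_furthest_round; infer_instance

-- ===== CLAIM (what is proved, stated in full; the proofs are below) =====
def Claim_equal_get_furthest_round : Prop := ∀ (picks_bracket : List (String × List (List (String × List (String × String))))) (team_name : String), Dom_get_furthest_round picks_bracket team_name → Pre_get_furthest_round picks_bracket team_name → Spec_get_furthest_round picks_bracket team_name (get_furthest_round picks_bracket team_name)


-- ===== LEMMAS AND PROOFS =====

-- the winner name a game contributes, if any
def pvName (g : List (String × List (String × String))) : Option String :=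
  if g ≠ [] then
    match (PySem.Dict.mk g).get? "winner" with
    | some w => if w ≠ [] then (PySem.Dict.mk w).get? "name" else none
    | none => none
  else none

-- the furthest round over rounds 1..5 as an Option, outermost test first
def pvChain (b1 b2 b3 b4 b5 : Bool) : Option Int :=
  if b5 then some 5 else if b4 then some 4 else if b3 then some 3
  else if b2 then some 2 else if b1 then some 1 else none

theorem pvAWins_eq (t : String) (g : List (String × List (String × String))) :
    pvAWins t g = (pvName g == some t) := by
  unfold pvAWins pvName
  by_cases hg : g ≠ [] <;> simp [hg]
  cases hw : (PySem.Dict.mk g).get? "winner" with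
  | none => simp
  | some w => by_cases hww : w = [] <;> simp [hww]

theorem pvBGame_eq (r : Int) (d : PySem.Dict String Int) (g : List (String × List (String × String))) :
    pvBGame r d g = (match pvName g with | some n => d.insert n r | none => d) := by
  unfold pvBGame pvName
  by_cases hg : g ≠ [] <;> simp [hg]
  cases hw : (PySem.Dict.mk g).get? "winner" with
  | none => simp
  | some w => by_cases hww : w = [] <;> simp [hww]

theorem pvB_fold_get? (t : String) (r : Int)
    (games : List (List (String × List (String × String)))) (d : PySem.Dict String Int) :
    (games.foldl (pvBGame r) d).get? t =
      if games.any (fun g => pvName g == some t) then some r else d.get? t := by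
  induction games generalizing d with
  | nil => simp
  | cons g rest ih =>
    simp only [List.foldl_cons, List.any_cons, ih]
    by_cases hrest : rest.any (fun g => pvName g == some t) = true
    · simp [hrest]
    · simp only [hrest, Bool.or_false]
      rw [pvBGame_eq]
      cases hn : pvName g with
      | none => simp [hn]
      | some n =>
        by_cases hnt : t = n
        · subst hnt; simp [hn, PySem.Dict.get?_insert_self]
        · rw [PySem.Dict.get?_insert_of_ne _ _ hnt]
          have hne : (pvName g == some t) = false := by
            simp [hn]; exact fun h => hnt h.symm
          simp [hne]
          exact fun h => absurd h.symm hnt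

theorem pvAGames_eq (t : String) (r : Int)
    (games : List (List (String × List (String × String)))) :
    pvAGames t r games =
      if games.any (fun g => pvName g == some t) then some r else none := by
  induction games with
  | nil => simp [pvAGames]
  | cons g rest ih =>
    simp only [pvAGames, pvAWins_eq, List.any_cons, ih]
    by_cases hg : (pvName g == some t) = true <;> simp [hg]

-- A's round loop equals the Option chain followed by getD 0
theorem pvChainA (picks : List (String × List (List (String × List (String × String))))) (t : String) :
    pvARounds picks t [5, 4, 3, 2, 1] =
      (pvChain
        (((PySem.Dict.mk picks).getD ("round" ++ PySem.Int.toStr 1) []).any (fun g => pvName g == some t))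
        (((PySem.Dict.mk picks).getD ("round" ++ PySem.Int.toStr 2) []).any (fun g => pvName g == some t))
        (((PySem.Dict.mk picks).getD ("round" ++ PySem.Int.toStr 3) []).any (fun g => pvName g == some t))
        (((PySem.Dict.mk picks).getD ("round" ++ PySem.Int.toStr 4) []).any (fun g => pvName g == some t))
        (((PySem.Dict.mk picks).getD ("round" ++ PySem.Int.toStr 5) []).any (fun g => pvName g == some t))).getD 0 := by
  simp only [pvARounds, pvAGames_eq, pvChain]
  generalize (((PySem.Dict.mk picks).getD ("round" ++ PySem.Int.toStr 1) []).any (fun g => pvName g == some t)) = b1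
  generalize (((PySem.Dict.mk picks).getD ("round" ++ PySem.Int.toStr 2) []).any (fun g => pvName g == some t)) = b2
  generalize (((PySem.Dict.mk picks).getD ("round" ++ PySem.Int.toStr 3) []).any (fun g => pvName g == some t)) = b3
  generalize (((PySem.Dict.mk picks).getD ("round" ++ PySem.Int.toStr 4) []).any (fun g => pvName g == some t)) = b4
  generalize (((PySem.Dict.mk picks).getD ("round" ++ PySem.Int.toStr 5) []).any (fun g => pvName g == some t)) = b5
  cases b5 <;> cases b4 <;> cases b3 <;> cases b2 <;> cases b1 <;> rfl

-- B's forward pass looked up at t is the same Option chain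
theorem pvBDict_get? (picks : List (String × List (List (String × List (String × String))))) (t : String) :
    (pvBDictAll picks).get? t =
      pvChain
        (((PySem.Dict.mk picks).getD ("round" ++ PySem.Int.toStr 1) []).any (fun g => pvName g == some t))
        (((PySem.Dict.mk picks).getD ("round" ++ PySem.Int.toStr 2) []).any (fun g => pvName g == some t))
        (((PySem.Dict.mk picks).getD ("round" ++ PySem.Int.toStr 3) []).any (fun g => pvName g == some t))
        (((PySem.Dict.mk picks).getD ("round" ++ PySem.Int.toStr 4) []).any (fun g => pvName g == some t))
        (((PySem.Dict.mk picks).getD ("round" ++ PySem.Int.toStr 5) []).any (fun g => pvName g == some t)) := by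
  unfold pvBDictAll
  rw [(by decide : PySem.List.pyRange 1 6 1 = [1, 2, 3, 4, 5])]
  simp only [List.foldl_cons, List.foldl_nil, pvB_fold_get?, PySem.Dict.get?_empty, pvChain]

-- ===== VERDICT (by name: the statement is the Claim_ definition above) =====
theorem get_furthest_round_spec : Claim_equal_get_furthest_round := by
  intro picks t _ hpre
  unfold Spec_get_furthest_round get_furthest_round get_furthest_round_alt
  rw [(by decide : PySem.List.pyRange 5 0 (-1) = [5, 4, 3, 2, 1])]
  rw [PySem.Dict.getD_eq_get?_getD]
  cases h6 : (PySem.Dict.mk picks).get? "round6" with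
  | none =>
    have hch : pvChamp picks = [] := by unfold pvChamp; rw [h6]; rfl
    have hfin : pvBFinal picks (pvBDictAll picks) = pvBDictAll picks := by
      unfold pvBFinal; rw [h6]
    rw [hfin, pvBDict_get?, if_neg (by simp [hch]), pvChainA]
  | some l =>
    have hl : l ≠ [] := fun h => hpre (by simpa [Pre_get_furthest_round, h] using h6)
    obtain ⟨g0, rest, rfl⟩ := List.exists_cons_of_ne_nil hl
    have hch : pvChamp picks = (PySem.Dict.mk g0).getD "winner" [] := by
      unfold pvChamp
      rw [h6]
      simp [PySem.List.pyGet?, PySem.List.pyIdx?]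
    by_cases hc : pvChamp picks ≠ [] ∧ (PySem.Dict.mk (pvChamp picks)).get? "name" = some t
    · -- A returns 6; B inserted t ↦ 6 last
      obtain ⟨hc1, hc2⟩ := hc
      have hfin : pvBFinal picks (pvBDictAll picks) = (pvBDictAll picks).insert t 6 := by
        unfold pvBFinal
        rw [h6]
        dsimp only
        rw [if_pos (by simp : (g0 :: rest) ≠ [])]
        simp only [List.headD_cons]
        rw [if_pos (by rw [← hch]; exact hc1)]
        have : (PySem.Dict.mk ((PySem.Dict.mk g0).getD "winner" [])).get? "name" = some t := by
          rw [← hch]; exact hc2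
        rw [this]
      rw [if_pos ⟨hc1, hc2⟩, hfin, PySem.Dict.get?_insert_self]
      rfl
    · -- A falls through to the round loop; B's round6 block does not touch key t
      have hfin : (pvBFinal picks (pvBDictAll picks)).get? t = (pvBDictAll picks).get? t := by
        unfold pvBFinal
        rw [h6]
        dsimp only
        rw [if_pos (by simp : (g0 :: rest) ≠ [])]
        simp only [List.headD_cons]
        by_cases hc1 : (PySem.Dict.mk g0).getD "winner" [] ≠ []
        · rw [if_pos hc1]
          cases hn : (PySem.Dict.mk ((PySem.Dict.mk g0).getD "winner" [])).get? "name" with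
          | none => rfl
          | some n =>
            have hnt : t ≠ n := by
              intro h; subst h
              exact hc ⟨by rw [hch]; exact hc1, by rw [hch]; exact hn⟩
            exact PySem.Dict.get?_insert_of_ne _ _ hnt
        · rw [if_neg hc1]
      rw [if_neg hc, hfin, pvBDict_get?, pvChainA]
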